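-- pv_equiv track=rewrite | github.com/tokumaru-y/competitive_program_python | select_problems_100/full_search/03.py | solve
-- ===== SOURCE A (Python) =====
-- def solve(s):
--     res=0
--     tmp=0
--     for c in s:
--         if c in ['A','C','G','T']:
--             tmp+=1
--         else:
--             res = max(res,tmp)
--             tmp=0
--     else:
--         res=max(res,tmp)
--     return res
-- ===== SOURCE B (Python) =====
-- from itertools import groupby
--
--
-- def solve(s):
--     return max((sum(1 for _ in g)
--                 for k, g in groupby(s, key=lambda c: c in ['A', 'C', 'G', 'T'])
--                 if k),
--                default=0)
-- ===== Notes on version B (the rewrite author's own statement) =====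
-- stated objective: idiomatic
-- what changed: Replaces the res/tmp running-counter loop with an itertools.groupby reduction: split s into maximal runs of equal ACGT-membership, keep the ACGT runs, and take the max of their lengths with default 0.
import Mathlib
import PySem

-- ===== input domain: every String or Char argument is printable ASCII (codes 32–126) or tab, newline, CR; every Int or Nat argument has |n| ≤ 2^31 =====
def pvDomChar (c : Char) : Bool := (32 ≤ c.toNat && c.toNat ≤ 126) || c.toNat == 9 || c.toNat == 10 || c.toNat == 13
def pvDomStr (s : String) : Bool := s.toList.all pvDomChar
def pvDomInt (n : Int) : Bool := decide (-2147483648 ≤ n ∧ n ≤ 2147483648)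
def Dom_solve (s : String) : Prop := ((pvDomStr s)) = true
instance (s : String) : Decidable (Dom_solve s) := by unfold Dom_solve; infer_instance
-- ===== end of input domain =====

-- B replaces A's res/tmp running-counter loop by a groupby-style reduction over maximal
-- runs (idiomatic; same O(n) cost).

-- ===== PORT A =====
-- literal port of A: fold the res/tmp state over the characters, final res = max(res, tmp)
def solve (s : String) : Int :=
  let st := s.toList.foldl
    (fun (st : Int × Int) c =>
      if c ∈ ['A', 'C', 'G', 'T'] then (st.1, st.2 + 1)
      else (max st.1 st.2, 0))
    (0, 0)
  max st.1 st.2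

-- ===== PORT B =====
-- the groupby key: c in ['A','C','G','T']
def isACGT (c : Char) : Bool := c == 'A' || c == 'C' || c == 'G' || c == 'T'

-- port of itertools.groupby(s, key=isACGT) with each group replaced by sum(1 for _ in g):
-- the list of (key, group length) pairs, groups being maximal runs of equal key
def groupLens : List Char → List (Bool × Int)
  | [] => []
  | c :: cs =>
      let k := isACGT c
      (k, 1 + (cs.takeWhile (fun d => isACGT d == k)).length) ::
        groupLens (cs.dropWhile (fun d => isACGT d == k))
termination_by l => l.length
decreasing_by
  simpa using Nat.lt_succ_of_le (List.length_dropWhile_le _ _)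

-- max(... if k, default=0)
def solve_alt (s : String) : Int :=
  ((groupLens s.toList).filter (·.1)).foldl (fun m p => max m p.2) 0

-- ===== PRECONDITION & SPEC =====
def Spec_solve (s : String) (out : Int) : Prop := out = solve_alt s
instance (s : String) (out : Int) : Decidable (Spec_solve s out) := by unfold Spec_solve; infer_instance

-- ===== CLAIM (what is proved, stated in full; the proofs are below) =====
def Claim_equal_solve : Prop := ∀ (s : String), Dom_solve s → Spec_solve s (solve s)

-- ===== LEMMAS AND PROOFS =====

-- reference value: longest ACGT-run, given a current run of length tmp
def best (tmp : Int) : List Char → Int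
  | [] => tmp
  | c :: cs => if isACGT c then best (tmp + 1) cs else max tmp (best 0 cs)

theorem le_best (tmp : Int) (l : List Char) : tmp ≤ best tmp l := by
  induction l generalizing tmp with
  | nil => simp [best]
  | cons c cs ih =>
    simp only [best]
    split
    · exact le_trans (by omega) (ih (tmp + 1))
    · exact le_max_left _ _

theorem best_nonneg (l : List Char) : 0 ≤ best 0 l := le_best 0 l

-- A's fold computes best
theorem foldl_best (l : List Char) (res tmp : Int) :
    max (l.foldl
        (fun (st : Int × Int) c =>
          if c ∈ ['A', 'C', 'G', 'T'] then (st.1, st.2 + 1)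
          else (max st.1 st.2, 0)) (res, tmp)).1
      (l.foldl
        (fun (st : Int × Int) c =>
          if c ∈ ['A', 'C', 'G', 'T'] then (st.1, st.2 + 1)
          else (max st.1 st.2, 0)) (res, tmp)).2 = max res (best tmp l) := by
  induction l generalizing res tmp with
  | nil => simp [best]
  | cons c cs ih =>
    by_cases h : isACGT c = true
    · have hc : c ∈ ['A', 'C', 'G', 'T'] := by
        simp [isACGT] at h
        simp only [List.mem_cons, List.not_mem_nil, or_false]
        tauto
      simp only [List.foldl_cons, if_pos hc, best, h, if_pos]
      exact ih res (tmp + 1)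
    · have hc : c ∉ ['A', 'C', 'G', 'T'] := by
        simp [isACGT] at h
        simp [h]
      simp only [List.foldl_cons, if_neg hc, best, h, if_neg, Bool.false_eq_true,
        not_false_eq_true]
      rw [ih (max res tmp) 0]
      omega

theorem best_true_run (tw : List Char) (h : ∀ d ∈ tw, isACGT d = true)
    (r : List Char) (tmp : Int) :
    best tmp (tw ++ r) = best (tmp + tw.length) r := by
  induction tw generalizing tmp with
  | nil => simp
  | cons d ds ih =>
    have hd := h d (by simp)
    simp only [List.cons_append, best, hd, if_pos]
    rw [ih (fun e he => h e (by simp [he]))]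
    congr 1
    simp only [List.length_cons]
    push_cast
    ring

theorem best_false_run (tw : List Char) (h : ∀ d ∈ tw, isACGT d = false)
    (r : List Char) : best 0 (tw ++ r) = best 0 r := by
  induction tw with
  | nil => simp
  | cons d ds ih =>
    have hd := h d (by simp)
    simp only [List.cons_append, best, hd, Bool.false_eq_true, if_neg, not_false_eq_true]
    rw [ih (fun e he => h e (by simp [he]))]
    have := best_nonneg r
    omega

-- after a maximal ACGT-run the next character (if any) is not ACGT, so restarting at 0 only
-- loses to the accumulated n
theorem best_start (n : Int) (hn : 0 ≤ n) (l : List Char)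
    (hl : ∀ d ds, l = d :: ds → isACGT d = false) : best n l = max n (best 0 l) := by
  cases l with
  | nil => simp [best]; omega
  | cons d ds =>
    have hd := hl d ds rfl
    simp only [best, hd, Bool.false_eq_true, if_neg, not_false_eq_true]
    have := best_nonneg ds
    omega

-- B's filtered fold computes best
theorem groupLens_best (l : List Char) (m : Int) (hm : 0 ≤ m) :
    ((groupLens l).filter (·.1)).foldl (fun m p => max m p.2) m = max m (best 0 l) := by
  induction hn : l.length using Nat.strong_induction_on generalizing l m with
  | _ n ih =>
  match l with
  | [] => simp [groupLens, best]; omega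
  | c :: cs =>
    cases hk : isACGT c with
    | true =>
      have hsplit := List.takeWhile_append_dropWhile
        (p := fun d => isACGT d == true) (l := cs)
      have hlen : (cs.dropWhile (fun d => isACGT d == true)).length < n := by
        have := List.length_dropWhile_le (fun d => isACGT d == true) cs
        simp at hn; omega
      rw [groupLens]
      simp only [hk, List.filter_cons, List.foldl_cons, if_pos]
      rw [ih _ hlen _ _ (by positivity) rfl]
      have htw : ∀ d ∈ cs.takeWhile (fun d => isACGT d == true), isACGT d = true := by
        intro d hd
        have := List.mem_takeWhile_imp hd
        simpa using this
      have hcs : best 1 cs =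
          best (1 + (cs.takeWhile (fun d => isACGT d == true)).length)
            (cs.dropWhile (fun d => isACGT d == true)) := by
        conv_lhs => rw [← hsplit]
        exact best_true_run _ htw _ 1
      have hbest : best 0 (c :: cs) =
          best (1 + (cs.takeWhile (fun d => isACGT d == true)).length)
            (cs.dropWhile (fun d => isACGT d == true)) := by
        rw [show best 0 (c :: cs) = if isACGT c = true then best (0 + 1) cs
              else max 0 (best 0 cs) from rfl, if_pos hk, zero_add, hcs]
      have hhead : ∀ d ds, cs.dropWhile (fun d => isACGT d == true) = d :: ds →
          isACGT d = false := by
        intro d ds hdds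
        have hne : cs.dropWhile (fun d => isACGT d == true) ≠ [] := by rw [hdds]; simp
        have h1 := List.head_dropWhile_not (fun d => isACGT d == true) hne
        have h2 : (cs.dropWhile (fun d => isACGT d == true)).head hne = d := by
          rw [← Option.some_inj, ← List.head?_eq_some_head, hdds, List.head?_cons]
        rw [h2] at h1
        simpa using h1
      rw [hbest, best_start (1 + ((cs.takeWhile (fun d => isACGT d == true)).length : Int))
        (by positivity) _ hhead]
      have := best_nonneg (cs.dropWhile (fun d => isACGT d == true))
      omega
    | false =>
      have hsplit := List.takeWhile_append_dropWhile
        (p := fun d => isACGT d == false) (l := cs)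
      have hlen : (cs.dropWhile (fun d => isACGT d == false)).length < n := by
        have := List.length_dropWhile_le (fun d => isACGT d == false) cs
        simp at hn; omega
      rw [groupLens]
      simp only [hk, List.filter_cons, Bool.false_eq_true, if_neg, not_false_eq_true]
      rw [ih _ hlen _ _ hm rfl]
      have htw : ∀ d ∈ cs.takeWhile (fun d => isACGT d == false), isACGT d = false := by
        intro d hd
        have := List.mem_takeWhile_imp hd
        simpa using this
      have hcs : best 0 cs = best 0 (cs.dropWhile (fun d => isACGT d == false)) := by
        conv_lhs => rw [← hsplit]
        exact best_false_run _ htw _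
      have hbest : best 0 (c :: cs) =
          best 0 (cs.dropWhile (fun d => isACGT d == false)) := by
        rw [show best 0 (c :: cs) = if isACGT c = true then best (0 + 1) cs
              else max 0 (best 0 cs) from rfl, if_neg (by simp [hk]), hcs]
        have := best_nonneg (cs.dropWhile (fun d => isACGT d == false))
        omega
      rw [hbest]

-- ===== VERDICT (by name: the statement is the Claim_ definition above) =====
theorem solve_spec : Claim_equal_solve := by
  intro s _
  show solve s = solve_alt s
  exact (foldl_best s.toList 0 0).trans (groupLens_best s.toList 0 le_rfl).symm
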